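-- pv_equiv track=rewrite | github.com/tamlog06/AntBook | 2-4/fence-repair.py | solve
-- ===== SOURCE A (Python) =====
-- def solve(N, L):
--     import heapq
--     # 最大のものを取り出し、ループの回数分足していく。本と逆の操作。
--     L = [-x for x in L]
--     heapq.heapify(L)
--     ans = 0
--     i = 0
--
--     while len(L) > 2:
--         i += 1
--         ans += (-i)*heapq.heappop(L)
--
--     ans += (-i-1)*sum(L)
--     return ans
-- ===== SOURCE B (Python) =====
-- def solve(N, L):
--     # Sort descending once; the k-th largest plank gets weight k+1,
--     # except the two smallest, which share weight len(L)-1.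
--     s = sorted(L, reverse=True)
--     n = len(s)
--     if n <= 2:
--         return sum(s)
--     ans = (n - 1) * (s[n - 2] + s[n - 1])
--     w = 0
--     for x in s[:n - 2]:
--         w += 1
--         ans += w * x
--     return ans
-- ===== Notes on version B (the rewrite author's own statement) =====
-- stated objective: faster
-- what changed: Replaced the negate+heapify+heappop loop with one descending sort followed by a single weighted pass (weight k+1 for the k-th largest, the two smallest sharing weight n-1).
import Mathlib
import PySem

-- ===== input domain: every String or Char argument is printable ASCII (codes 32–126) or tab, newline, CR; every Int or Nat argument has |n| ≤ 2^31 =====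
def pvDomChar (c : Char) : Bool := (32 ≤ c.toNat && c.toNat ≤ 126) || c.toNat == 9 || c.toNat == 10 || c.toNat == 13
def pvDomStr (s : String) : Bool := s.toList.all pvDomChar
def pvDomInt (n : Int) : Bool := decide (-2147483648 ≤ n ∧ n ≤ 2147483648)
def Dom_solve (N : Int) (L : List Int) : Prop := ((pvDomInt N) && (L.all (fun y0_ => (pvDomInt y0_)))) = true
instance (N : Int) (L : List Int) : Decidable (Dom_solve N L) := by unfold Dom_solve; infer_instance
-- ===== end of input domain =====

-- B replaces A's negate+heapify+heappop loop by one descending sort and a single weighted pass (simpler).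

-- ===== PORT A =====
-- A's heapq usage (heapify then heappop on the negated list) is ported by hand as repeated
-- extraction of the minimum VALUE of the current multiset: heappop always returns (and removes)
-- a minimum element, so this is exact at the level of returned values. Fuel = list length
-- bounds the while-loop (each heappop removes exactly one element).
def solveLoopA (fuel : Nat) (ans i : Int) (L : List Int) : Int :=
  match fuel with
  | 0 => ans + (-i - 1) * L.sum
  | fuel + 1 =>
    if L.length > 2 then
      match PySem.List.min? L (fun x => x) with
      | some m =>
        match PySem.List.remove? L m with
        | some L' => solveLoopA fuel (ans + (-(i + 1)) * m) (i + 1) L'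
        | none => ans                    -- unreachable: m ∈ L
      | none => ans                      -- unreachable: L ≠ []
    else ans + (-i - 1) * L.sum

def solve (N : Int) (L : List Int) : Int :=
  let L' := L.map (fun x => -x)
  solveLoopA L'.length 0 0 L'

-- ===== PORT B =====
def solve_alt (N : Int) (L : List Int) : Int :=
  let s := PySem.List.sorted L (fun x => x) true
  let n : Int := s.length
  if n ≤ 2 then s.sum
  else
    -- s[n-2], s[n-1] are in range here (n ≥ 3), so 'getD 0' never supplies its default
    let ans := (n - 1) * ((PySem.List.pyGet? s (n - 2)).getD 0 + (PySem.List.pyGet? s (n - 1)).getD 0)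
    ((PySem.List.slice s none (some (n - 2))).foldl
      (fun (p : Int × Int) x => (p.1 + 1, p.2 + (p.1 + 1) * x)) ((0 : Int), ans)).2

-- ===== PRECONDITION & SPEC =====
def Spec_solve (N : Int) (L : List Int) (out : Int) : Prop := out = solve_alt N L
instance (N : Int) (L : List Int) (out : Int) : Decidable (Spec_solve N L out) := by unfold Spec_solve; infer_instance

-- ===== CLAIM (what is proved, stated in full; the proofs are below) =====
def Claim_equal_solve : Prop := ∀ (N : Int) (L : List Int), Dom_solve N L → Spec_solve N L (solve N L)

-- ===== LEMMAS AND PROOFS =====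

-- min? (with identity key) is invariant under permutation
lemma min?_id_perm (L1 L2 : List Int) (h : L1.Perm L2) :
    PySem.List.min? L1 (fun x => x) = PySem.List.min? L2 (fun x => x) := by
  cases h1 : PySem.List.min? L1 (fun x => x) with
  | none =>
    rw [PySem.List.min?_eq_none_iff] at h1
    subst h1
    rw [eq_comm, PySem.List.min?_eq_none_iff]
    exact h.symm.eq_nil
  | some m1 =>
    cases h2 : PySem.List.min? L2 (fun x => x) with
    | none =>
      rw [PySem.List.min?_eq_none_iff] at h2
      subst h2
      have := h.eq_nil
      subst this
      have h0 : PySem.List.min? ([] : List Int) (fun x => x) = none := by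
        rw [PySem.List.min?_eq_none_iff]
      rw [h0] at h1
      cases h1
    | some m2 =>
      have hm1 : m1 ∈ L1 := PySem.List.min?_mem h1
      have hm2 : m2 ∈ L2 := PySem.List.min?_mem h2
      have h12 := PySem.List.min?_isMin h1 m2 (h.mem_iff.mpr hm2)
      have h21 := PySem.List.min?_isMin h2 m1 (h.mem_iff.mp hm1)
      simp only at h12 h21
      exact congrArg some (le_antisymm h12 h21)

-- A's loop depends only on the multiset of its list argument
lemma solveLoopA_perm (fuel : Nat) :
    ∀ (L1 L2 : List Int), L1.Perm L2 → ∀ ans i,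
      solveLoopA fuel ans i L1 = solveLoopA fuel ans i L2 := by
  induction fuel with
  | zero => intro L1 L2 h ans i; simp [solveLoopA, h.sum_eq]
  | succ fuel ih =>
    intro L1 L2 h ans i
    by_cases hlen : L2.length > 2
    · have hm := min?_id_perm L1 L2 h
      cases h2 : PySem.List.min? L2 (fun x => x) with
      | none =>
        rw [PySem.List.min?_eq_none_iff] at h2
        subst h2; simp at hlen
      | some m =>
        have hmem2 : m ∈ L2 := PySem.List.min?_mem h2
        have hmem1 : m ∈ L1 := h.mem_iff.mpr hmem2
        rw [h2] at hm
        simp only [solveLoopA, h.length_eq, if_pos hlen, hm, h2,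
          PySem.List.remove?_eq_some_erase _ _ hmem1, PySem.List.remove?_eq_some_erase _ _ hmem2]
        exact ih _ _ (h.erase m) _ _
    · simp only [solveLoopA, h.length_eq, if_neg hlen, h.sum_eq]

lemma solveLoopA_succ (fuel : Nat) (ans i : Int) (L : List Int) :
    solveLoopA (fuel + 1) ans i L =
      if L.length > 2 then
        match PySem.List.min? L (fun x => x) with
        | some m =>
          match PySem.List.remove? L m with
          | some L' => solveLoopA fuel (ans + (-(i + 1)) * m) (i + 1) L'
          | none => ans
        | none => ans
      else ans + (-i - 1) * L.sum := rfl

-- closed recursive description of A's loop on an ascending-sorted list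
def aRes (ans i : Int) : List Int → Int
  | [] => ans + (-i - 1) * 0
  | [a] => ans + (-i - 1) * a
  | [a, b] => ans + (-i - 1) * (a + b)
  | a :: b :: c :: rest => aRes (ans + (-(i + 1)) * a) (i + 1) (b :: c :: rest)

lemma foldl_min_of_le (t : List Int) : ∀ (a : Int), (∀ x ∈ t, a ≤ x) → t.foldl min a = a := by
  induction t with
  | nil => intro a _; rfl
  | cons x t ih =>
    intro a ha
    simp only [List.foldl_cons]
    rw [min_eq_left (ha x (List.mem_cons_self))]
    exact ih a (fun y hy => ha y (List.mem_cons_of_mem _ hy))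

lemma solveLoopA_sorted (u : List Int) : u.Pairwise (· ≤ ·) →
    ∀ ans i, solveLoopA u.length ans i u = aRes ans i u := by
  induction u with
  | nil => intro _ ans i; simp [solveLoopA, aRes]
  | cons a t ih =>
    intro hs ans i
    cases t with
    | nil => simp [solveLoopA, aRes]
    | cons b t2 =>
      cases t2 with
      | nil => simp [solveLoopA, aRes]
      | cons c rest =>
        have hpc := List.pairwise_cons.mp hs
        have hmin : PySem.List.min? (a :: b :: c :: rest) (fun x => x) = some a := by
          rw [PySem.List.min?_id_cons]
          exact congrArg some (foldl_min_of_le _ a hpc.1)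
        have hrem : PySem.List.remove? (a :: b :: c :: rest) a = some (b :: c :: rest) :=
          PySem.List.remove?_cons_self a (b :: c :: rest)
        rw [show (a :: b :: c :: rest).length = (b :: c :: rest).length + 1 by simp,
            solveLoopA_succ, if_pos (by simp only [List.length_cons]; omega)]
        simp only [hmin, hrem]
        rw [ih hpc.2 (ans + (-(i + 1)) * a) (i + 1)]
        rfl

-- B's weighted pass over the descending list equals A's description on the negated list
lemma aRes_neg (s : List Int) :
    ∀ (ans w : Int),
      aRes ans w (s.map (fun x => -x)) =
        if s.length ≤ 2 then ans + (w + 1) * s.sum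
        else ((s.take (s.length - 2)).foldl
          (fun (p : Int × Int) x => (p.1 + 1, p.2 + (p.1 + 1) * x))
          (w, ans + (w + (s.length : Int) - 1) * (s.drop (s.length - 2)).sum)).2 := by
  induction s with
  | nil => intro ans w; simp [aRes]
  | cons a t ih =>
    intro ans w
    cases t with
    | nil => simp [aRes]; ring
    | cons b t2 =>
      cases t2 with
      | nil => simp [aRes]; ring
      | cons c rest =>
        have lhs : aRes ans w ((a :: b :: c :: rest).map (fun x => -x)) =
            aRes ((ans + (w + 1) * a)) (w + 1) ((b :: c :: rest).map (fun x => -x)) := by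
          simp only [List.map_cons, aRes]
          ring_nf
        rw [lhs, ih]
        cases rest with
        | nil =>
          simp [aRes, List.take, List.drop]
          ring
        | cons d r2 =>
          rw [if_neg (by simp), if_neg (by simp)]
          have ht : (a :: b :: c :: d :: r2).take ((a :: b :: c :: d :: r2).length - 2) =
              a :: ((b :: c :: d :: r2).take ((b :: c :: d :: r2).length - 2)) := by
            simp only [List.length_cons]
            rw [show r2.length + 1 + 1 + 1 + 1 - 2 = (r2.length + 1 + 1 + 1 - 2) + 1 by omega]
            rfl
          have hd : (a :: b :: c :: d :: r2).drop ((a :: b :: c :: d :: r2).length - 2) =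
              (b :: c :: d :: r2).drop ((b :: c :: d :: r2).length - 2) := by
            simp only [List.length_cons]
            rw [show r2.length + 1 + 1 + 1 + 1 - 2 = (r2.length + 1 + 1 + 1 - 2) + 1 by omega]
            rfl
          rw [ht, hd, List.foldl_cons]
          congr 2
          simp only [List.length_cons]
          push_cast
          ring

lemma drop_two_last (s : List Int) (h : 2 ≤ s.length) :
    s.drop (s.length - 2) = [s[s.length - 2]'(by omega), s[s.length - 1]'(by omega)] := by
  apply List.ext_getElem
  · simp; omega
  · intro i h1 h2
    simp only [List.getElem_drop]
    have hi : i < 2 := by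
      have := List.length_drop (l := s) (i := s.length - 2) ▸ h1
      simp at h1; omega
    interval_cases i
    · simp
    · simp [show s.length - 2 + 1 = s.length - 1 from by omega]

-- ===== VERDICT (by name: the statement is the Claim_ definition above) =====
theorem solve_spec : Claim_equal_solve := by
  intro N L _
  unfold Spec_solve
  have hperm : (PySem.List.sorted L (fun x => x) true).Perm L := PySem.List.sorted_perm L (fun x => x) true
  have hpw : (PySem.List.sorted L (fun x => x) true).Pairwise (fun a b => b ≤ a) :=
    PySem.List.sorted_pairwise_rev L (fun x => x)
  set s := PySem.List.sorted L (fun x => x) true with hsdef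
  have hpwneg : (s.map (fun x => -x)).Pairwise (· ≤ ·) := by
    rw [List.pairwise_map]
    exact hpw.imp (by intro a b hab; omega)
  have h1 : solve N L = aRes 0 0 (s.map (fun x => -x)) := by
    unfold solve
    rw [solveLoopA_perm _ _ _ ((hperm.map _).symm),
        show (L.map (fun x => -x)).length = (s.map (fun x => -x)).length by
          simp [hperm.length_eq],
        solveLoopA_sorted _ hpwneg]
  rw [h1, aRes_neg]
  unfold solve_alt
  rw [← hsdef]
  by_cases hc : s.length ≤ 2
  · rw [if_pos hc, if_pos (by exact_mod_cast hc)]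
    ring
  · have hc3 : 2 < s.length := by omega
    rw [if_neg hc, if_neg (by omega)]
    have hcast : ((s.length : Int) - 2) = ((s.length - 2 : Nat) : Int) := by omega
    have hslice : PySem.List.slice s none (some ((s.length : Int) - 2)) = s.take (s.length - 2) := by
      rw [hcast, PySem.List.slice_to_natCast]
    have hg2 : (PySem.List.pyGet? s ((s.length : Int) - 2)).getD 0 = s[s.length - 2]'(by omega) := by
      rw [hcast, PySem.List.pyGet?_natCast, List.getElem?_eq_getElem (by omega)]
      rfl
    have hg1 : (PySem.List.pyGet? s ((s.length : Int) - 1)).getD 0 = s[s.length - 1]'(by omega) := by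
      rw [show ((s.length : Int) - 1) = ((s.length - 1 : Nat) : Int) by omega,
          PySem.List.pyGet?_natCast, List.getElem?_eq_getElem (by omega)]
      rfl
    rw [hslice, hg2, hg1, drop_two_last s (by omega)]
    congr 2
    simp only [List.sum_cons, List.sum_nil]
    ring
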